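-- pv_equiv track=rewrite | github.com/pragati-afk/Hoocup-Finetuning | Riya.py | build_finetune_examples
-- ===== SOURCE A (Python) =====
-- from typing import List, Tuple
--
-- def build_finetune_examples(chats: List[Tuple[str,str]], assistant_name: str):
--     """Create fine-tuning pairs in OpenAI format."""
--     assistant_lower = assistant_name.lower()
--     examples = []
--
--     for i, (speaker, message) in enumerate(chats):
--         if speaker.lower() != assistant_lower:
--             continue
--
--         # find last partner message before this assistant reply
--         partner_msg = None
--         for j in range(i - 1, -1, -1):
--             prev_speaker, prev_message = chats[j]
--             if prev_speaker.lower() != assistant_lower: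
--                 partner_msg = prev_message
--                 break
--
--         if partner_msg is None:
--             continue  # skip assistant messages with no prior partner msg
--
--         example = {
--             "messages": [
--                 {"role": "user", "content": partner_msg},
--                 {"role": "assistant", "content": message}
--             ]
--         }
--         examples.append(example)
--
--     return examples
-- ===== SOURCE B (Python) =====
-- from typing import List, Tuple
--
-- def build_finetune_examples(chats: List[Tuple[str, str]], assistant_name: str):
--     """Create fine-tuning pairs in OpenAI format (single forward pass)."""
--     assistant_lower = assistant_name.lower()
--     examples = []
--     last_partner = None
--     for speaker, message in chats:
--         if speaker.lower() != assistant_lower: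
--             last_partner = message
--         elif last_partner is not None:
--             examples.append({
--                 "messages": [
--                     {"role": "user", "content": last_partner},
--                     {"role": "assistant", "content": message}
--                 ]
--             })
--     return examples
-- ===== Notes on version B (the rewrite author's own statement) =====
-- stated objective: faster
-- what changed: Replaced A's per-reply backward scan for the previous partner message by a single forward pass that tracks the last partner message seen, removing the nested loop.
import Mathlib
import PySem

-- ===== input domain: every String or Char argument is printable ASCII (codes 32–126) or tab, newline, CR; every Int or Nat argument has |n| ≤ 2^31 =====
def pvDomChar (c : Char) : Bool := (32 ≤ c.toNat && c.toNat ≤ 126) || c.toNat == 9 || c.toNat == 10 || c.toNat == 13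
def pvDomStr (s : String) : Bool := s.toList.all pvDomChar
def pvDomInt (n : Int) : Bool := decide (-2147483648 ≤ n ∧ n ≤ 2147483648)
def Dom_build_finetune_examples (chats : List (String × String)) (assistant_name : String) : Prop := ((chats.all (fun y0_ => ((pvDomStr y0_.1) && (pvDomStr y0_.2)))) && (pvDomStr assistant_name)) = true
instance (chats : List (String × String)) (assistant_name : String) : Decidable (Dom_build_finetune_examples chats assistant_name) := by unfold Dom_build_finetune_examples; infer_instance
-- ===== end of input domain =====

-- B replaces A's quadratic per-reply backward scan by one forward pass tracking the last partner message (objective: faster, asymptotic).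


-- the example dict literal both Pythons build: {"messages": [{"role":"user",...},{"role":"assistant",...}]}
def pvMkEx (p m : String) : List (String × List (List (String × String))) :=
  [("messages", [[("role", "user"), ("content", p)], [("role", "assistant"), ("content", m)]])]

-- ===== PORT A =====
-- A's inner loop 'for j in range(i-1,-1,-1)': checks chats[j], j = fuel-1 down to 0 (indices always in range in A)
def pvScanBack (chats : List (String × String)) (al : String) : Nat → Option String
  | 0 => none
  | j + 1 =>
    let prev := chats.getD j ("", "")
    if PySem.Str.lower prev.1 ≠ al then some prev.2 else pvScanBack chats al j

def build_finetune_examples (chats : List (String × String)) (assistant_name : String) : List (List (String × List (List (String × String)))) :=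
  let al := PySem.Str.lower assistant_name
  List.foldl (fun acc x =>
    if PySem.Str.lower x.1.1 ≠ al then acc
    else
      match pvScanBack chats al x.2 with
      | none => acc
      | some p => acc ++ [pvMkEx p x.1.2]) [] chats.zipIdx

-- ===== PORT B =====
def build_finetune_examples_alt (chats : List (String × String)) (assistant_name : String) : List (List (String × List (List (String × String)))) :=
  let al := PySem.Str.lower assistant_name
  (List.foldl (fun st x =>
    if PySem.Str.lower x.1 ≠ al then (some x.2, st.2)
    else
      match st.1 with
      | none => st
      | some p => (some p, st.2 ++ [pvMkEx p x.2]))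
    ((none : Option String), ([] : List (List (String × List (List (String × String)))))) chats).2

-- ===== PRECONDITION & SPEC =====
def Spec_build_finetune_examples (chats : List (String × String)) (assistant_name : String) (out : List (List (String × List (List (String × String))))) : Prop := out = build_finetune_examples_alt chats assistant_name
instance (chats : List (String × String)) (assistant_name : String) (out : List (List (String × List (List (String × String))))) : Decidable (Spec_build_finetune_examples chats assistant_name out) := by unfold Spec_build_finetune_examples; infer_instance

-- ===== CLAIM (what is proved, stated in full; the proofs are below) =====
def Claim_equal_build_finetune_examples : Prop := ∀ (chats : List (String × String)) (assistant_name : String), Dom_build_finetune_examples chats assistant_name → Spec_build_finetune_examples chats assistant_name (build_finetune_examples chats assistant_name)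

-- ===== LEMMAS AND PROOFS =====

-- B's tracked state: the last partner message in the prefix processed so far
def pvTrack (al : String) (xs : List (String × String)) : Option String :=
  List.foldl (fun st x => if PySem.Str.lower x.1 ≠ al then some x.2 else st) none xs

theorem pvTrack_concat (al : String) (xs : List (String × String)) (x : String × String) :
    pvTrack al (xs ++ [x]) = if PySem.Str.lower x.1 ≠ al then some x.2 else pvTrack al xs := by
  simp [pvTrack, List.foldl_append]

-- A's backward scan over the first n elements computes B's tracked state for that prefix
theorem pvScanBack_eq_track (chats : List (String × String)) (al : String) :
    ∀ n, n ≤ chats.length → pvScanBack chats al n = pvTrack al (chats.take n) := by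
  intro n
  induction n with
  | zero => intro _; simp [pvScanBack, pvTrack]
  | succ j ih =>
    intro h
    have hj : j < chats.length := by omega
    have htake : chats.take (j + 1) = chats.take j ++ [chats[j]] := by
      rw [List.take_add_one, List.getElem?_eq_getElem hj]; rfl
    rw [htake, pvTrack_concat, pvScanBack]
    have hgetD : chats.getD j ("", "") = chats[j] := List.getD_eq_getElem chats _ hj
    rw [hgetD, ih (by omega)]

theorem pv_main (chats : List (String × String)) (al : String) :
    ∀ (suffix pre : List (String × String))
      (acc : List (List (String × List (List (String × String))))),
      chats = pre ++ suffix →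
      List.foldl (fun acc x =>
        if PySem.Str.lower x.1.1 ≠ al then acc
        else match pvScanBack chats al x.2 with
          | none => acc
          | some p => acc ++ [pvMkEx p x.1.2]) acc (suffix.zipIdx pre.length)
      = (List.foldl (fun st x =>
          if PySem.Str.lower x.1 ≠ al then (some x.2, st.2)
          else match st.1 with
            | none => st
            | some p => (some p, st.2 ++ [pvMkEx p x.2]))
          (pvTrack al pre, acc) suffix).2 := by
  intro suffix
  induction suffix with
  | nil => intro pre acc _; simp
  | cons x rest ih =>
    intro pre acc hchats
    have hscan : pvScanBack chats al pre.length = pvTrack al pre := by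
      rw [pvScanBack_eq_track chats al pre.length (by simp [hchats]),
          hchats, List.take_left]
    have hpre' : chats = (pre ++ [x]) ++ rest := by simp [hchats]
    have hlen : (pre ++ [x]).length = pre.length + 1 := by simp
    simp only [List.zipIdx_cons, List.foldl_cons]
    by_cases h : PySem.Str.lower x.1 ≠ al
    · simp only [if_pos h]
      have := ih (pre ++ [x]) acc hpre'
      rw [hlen] at this
      rw [this, pvTrack_concat]
      simp [h]
    · simp only [if_neg h]
      rw [hscan]
      have hkeep : pvTrack al (pre ++ [x]) = pvTrack al pre := by
        rw [pvTrack_concat]; simp [h]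
      cases htr : pvTrack al pre with
      | none =>
        have := ih (pre ++ [x]) acc hpre'
        rw [hlen, hkeep, htr] at this
        simpa using this
      | some p =>
        have := ih (pre ++ [x]) (acc ++ [pvMkEx p x.2]) hpre'
        rw [hlen, hkeep, htr] at this
        simpa using this

-- ===== VERDICT (by name: the statement is the Claim_ definition above) =====
theorem build_finetune_examples_spec : Claim_equal_build_finetune_examples := by
  intro chats assistant_name _
  unfold Spec_build_finetune_examples build_finetune_examples build_finetune_examples_alt
  have := pv_main chats (PySem.Str.lower assistant_name) chats [] [] rfl
  simpa [pvTrack] using this
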